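-- pv_equiv track=rewrite | github.com/ksomemo/Competitive-programming | atcoder/arc/041/p_c.py | solve
-- ===== SOURCE A (Python) =====
-- def count_jump(right_list, left_list, L):
--     jump_count = 0
--     if len(right_list) == 0:
--         for i, p in enumerate(left_list):
--             jump_count += p - i - 1
--     elif len(left_list) == 0:
--         for i, p in enumerate(right_list):
--             jump_count += L - p - i
--     else:
--         # 各向きのグループの間隔を詰める
--         for i, p in enumerate(right_list):
--             jump_count += right_list[-1] - p - i
--         for i, p in enumerate(left_list):
--             jump_count += p - left_list[0] - i
--
--         # グループ先頭同士の間を片方のグループを進めて詰める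
--         head_diff = left_list[0] - right_list[-1] - 1
--         max_cnt = max(len(right_list), len(left_list))
--         jump_count += head_diff * max_cnt
--
--     return jump_count
--
-- def solve(rabbits, L):
--     # 最初は右向き
--     jump_count = 0
--     bef_d = 'R'
--     right_list = []
--     left_list = []
--
--     for n_pos, n_d in rabbits:
--         # 背中合わせになったら、向き合っているグループのJUMP回数を求める
--         if bef_d == 'L' and n_d == 'R':
--             jump_count += count_jump(right_list, left_list, L)
--
--             right_list = []
--             left_list = []
--
--         # うさぎを集める
--         if n_d == 'R':
--             right_list.append(n_pos)
--         else:
--             left_list.append(n_pos)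
--         # 前回の方向を保持
--         bef_d = n_d
--
--     jump_count += count_jump(right_list, left_list, L)
--
--     return jump_count
-- ===== SOURCE B (Python) =====
-- def solve(rabbits, L):
--     # one pass, O(1) extra memory: track per-group counts/sums instead of lists,
--     # and compute each group's jump total with closed-form arithmetic
--     def tri(m):
--         return m * (m - 1) // 2
--
--     def flush(rc, rs, rlast, lc, ls, lfirst):
--         if rc == 0:
--             return ls - lc - tri(lc)
--         if lc == 0:
--             return rc * L - rs - tri(rc)
--         return (rc * rlast - rs - tri(rc)) + (ls - lc * lfirst - tri(lc)) \
--             + (lfirst - rlast - 1) * max(rc, lc)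
--
--     total = 0
--     bef = 'R'
--     rc = rs = rlast = lc = ls = lfirst = 0
--     for p, d in rabbits:
--         if bef == 'L' and d == 'R':
--             total += flush(rc, rs, rlast, lc, ls, lfirst)
--             rc = rs = rlast = lc = ls = lfirst = 0
--         if d == 'R':
--             rc += 1
--             rs += p
--             rlast = p
--         else:
--             if lc == 0:
--                 lfirst = p
--             lc += 1
--             ls += p
--         bef = d
--     return total + flush(rc, rs, rlast, lc, ls, lfirst)
-- ===== Notes on version B (the rewrite author's own statement) =====
-- stated objective: alternative
-- what changed: Replaces the per-rabbit lists and count_jump's enumerate loops by a single pass that keeps only each group's count/sum/boundary positions and computes every group's jump total with closed-form arithmetic (O(1) extra memory, no inner loops).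
import Mathlib
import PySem

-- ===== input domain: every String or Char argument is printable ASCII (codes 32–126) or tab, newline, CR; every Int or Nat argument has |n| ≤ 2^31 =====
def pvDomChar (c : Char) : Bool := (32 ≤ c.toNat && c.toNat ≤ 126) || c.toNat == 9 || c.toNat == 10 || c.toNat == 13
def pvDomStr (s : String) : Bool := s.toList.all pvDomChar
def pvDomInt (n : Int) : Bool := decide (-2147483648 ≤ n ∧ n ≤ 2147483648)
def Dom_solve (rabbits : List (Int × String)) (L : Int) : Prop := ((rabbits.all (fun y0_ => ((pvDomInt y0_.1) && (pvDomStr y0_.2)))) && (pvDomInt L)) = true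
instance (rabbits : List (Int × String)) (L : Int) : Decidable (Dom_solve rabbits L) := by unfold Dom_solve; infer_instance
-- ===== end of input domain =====

-- B replaces the per-group lists and enumerate loops by one pass over count/sum/boundary
-- accumulators with closed-form group totals (alternative decomposition, O(1) extra memory).


-- ===== PORT A =====
-- count_jump: three branches, each an enumerate loop (indices are Int, as Python's)
def count_jump (right_list left_list : List Int) (L : Int) : Int :=
  if right_list.length = 0 then
    (PySem.List.enumerate left_list 0).foldl (fun jc ip => jc + (ip.2 - ip.1 - 1)) 0
  else if left_list.length = 0 then
    (PySem.List.enumerate right_list 0).foldl (fun jc ip => jc + (L - ip.2 - ip.1)) 0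
  else
    -- right_list[-1] / left_list[0] are in range here (both lists nonempty)
    let rlast := (PySem.List.pyGet? right_list (-1)).getD 0
    let lfirst := (PySem.List.pyGet? left_list 0).getD 0
    let jc := (PySem.List.enumerate right_list 0).foldl (fun jc ip => jc + (rlast - ip.2 - ip.1)) 0
    let jc := (PySem.List.enumerate left_list 0).foldl (fun jc ip => jc + (ip.2 - lfirst - ip.1)) 0 + jc
    let head_diff := lfirst - rlast - 1
    let max_cnt : Int := max (right_list.length : Int) (left_list.length : Int)
    jc + head_diff * max_cnt

-- one step of solve's loop over (jump_count, bef_d, right_list, left_list)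
def stepA (L : Int) (st : Int × String × List Int × List Int) (pd : Int × String) :
    Int × String × List Int × List Int :=
  let (jc, bef, rl, ll) := st
  let (p, d) := pd
  let (jc, rl, ll) :=
    if bef = "L" ∧ d = "R" then (jc + count_jump rl ll L, ([] : List Int), ([] : List Int))
    else (jc, rl, ll)
  if d = "R" then (jc, d, rl ++ [p], ll) else (jc, d, rl, ll ++ [p])

def solve (rabbits : List (Int × String)) (L : Int) : Int :=
  let st := rabbits.foldl (stepA L) (0, "R", [], [])
  st.1 + count_jump st.2.2.1 st.2.2.2 L

-- ===== PORT B =====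
def triB (m : Int) : Int := PySem.Int.floordiv (m * (m - 1)) 2

def flushB (L rc rs rlast lc ls lfirst : Int) : Int :=
  if rc = 0 then ls - lc - triB lc
  else if lc = 0 then rc * L - rs - triB rc
  else (rc * rlast - rs - triB rc) + (ls - lc * lfirst - triB lc)
    + (lfirst - rlast - 1) * max rc lc

-- one step over (total, bef, rc, rs, rlast, lc, ls, lfirst)
def stepB (L : Int) (st : Int × String × Int × Int × Int × Int × Int × Int) (pd : Int × String) :
    Int × String × Int × Int × Int × Int × Int × Int :=
  let (total, bef, rc, rs, rlast, lc, ls, lfirst) := st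
  let (p, d) := pd
  let (total, rc, rs, rlast, lc, ls, lfirst) :=
    if bef = "L" ∧ d = "R" then
      (total + flushB L rc rs rlast lc ls lfirst, 0, 0, 0, 0, 0, 0)
    else (total, rc, rs, rlast, lc, ls, lfirst)
  if d = "R" then (total, d, rc + 1, rs + p, p, lc, ls, lfirst)
  else (total, d, rc, rs, rlast, lc + 1, ls + p, if lc = 0 then p else lfirst)

def solve_alt (rabbits : List (Int × String)) (L : Int) : Int :=
  let st := rabbits.foldl (stepB L) (0, "R", 0, 0, 0, 0, 0, 0)
  st.1 + flushB L st.2.2.1 st.2.2.2.1 st.2.2.2.2.1 st.2.2.2.2.2.1 st.2.2.2.2.2.2.1 st.2.2.2.2.2.2.2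

-- ===== PRECONDITION & SPEC =====
def Spec_solve (rabbits : List (Int × String)) (L : Int) (out : Int) : Prop := out = solve_alt rabbits L
instance (rabbits : List (Int × String)) (L : Int) (out : Int) : Decidable (Spec_solve rabbits L out) := by unfold Spec_solve; infer_instance

-- ===== CLAIM (what is proved, stated in full; the proofs are below) =====
def Claim_equal_solve : Prop := ∀ (rabbits : List (Int × String)) (L : Int), Dom_solve rabbits L → Spec_solve rabbits L (solve rabbits L)

-- ===== LEMMAS AND PROOFS =====

-- encode A's loop state as B's loop state
def encB (st : Int × String × List Int × List Int) :
    Int × String × Int × Int × Int × Int × Int × Int :=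
  let (jc, bef, rl, ll) := st
  (jc, bef, (rl.length : Int), rl.sum, rl.getLastD 0, (ll.length : Int), ll.sum, ll.headD 0)

theorem triB_natCast (n : Nat) : triB (n : Int) = ((n * (n - 1) / 2 : Nat) : Int) := by
  unfold triB
  rw [PySem.Int.floordiv_eq_ediv_of_pos (by norm_num)]
  have h1 : ((n : Int)) * ((n : Int) - 1) = ((n * (n - 1) : Nat) : Int) := by
    cases n with
    | zero => simp
    | succ m => push_cast [Nat.succ_sub_one]; ring
  rw [h1]
  omega

theorem tri_succ (m : Nat) : (m + 1) * (m + 1 - 1) / 2 = m * (m - 1) / 2 + m := by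
  cases m with
  | zero => simp
  | succ k =>
    have h : (k + 1 + 1) * (k + 1 + 1 - 1) = (k + 1) * (k + 1 - 1) + 2 * (k + 1) := by
      simp only [Nat.add_sub_cancel]; ring
    rw [h, Nat.add_mul_div_left _ _ (by norm_num)]

-- closed form for an enumerate fold with an affine body
theorem enum_foldl_affine (u v w : Int) : ∀ (l : List Int) (s acc : Int),
    (PySem.List.enumerate l s).foldl (fun jc ip => jc + (u * ip.2 + v * ip.1 + w)) acc
      = acc + u * l.sum + v * ((l.length : Int) * s + ((l.length * (l.length - 1) / 2 : Nat) : Int))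
        + w * l.length := by
  intro l
  induction l with
  | nil => intro s acc; simp [PySem.List.enumerate_nil]
  | cons x t ih =>
    intro s acc
    rw [PySem.List.enumerate_cons, List.foldl_cons, ih]
    simp only [List.sum_cons, List.length_cons]
    rw [tri_succ]
    push_cast
    ring

theorem count_jump_eq_flushB (rl ll : List Int) (L : Int) :
    count_jump rl ll L
      = flushB L (rl.length : Int) rl.sum (rl.getLastD 0) (ll.length : Int) ll.sum (ll.headD 0) := by
  unfold count_jump flushB
  rcases rl with _ | ⟨r0, rt⟩
  · rw [if_pos (by simp), if_pos (by simp)]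
    rw [show (fun (jc : Int) (ip : Int × Int) => jc + (ip.2 - ip.1 - 1))
        = (fun jc ip => jc + ((1 : Int) * ip.2 + (-1) * ip.1 + (-1))) from by
          funext jc ip; ring]
    rw [enum_foldl_affine, triB_natCast]
    ring
  · have hr : ¬ (r0 :: rt).length = 0 := by simp
    have hr' : ¬ ((r0 :: rt).length : Int) = 0 := by exact_mod_cast hr
    rw [if_neg hr, if_neg hr']
    rcases ll with _ | ⟨l0, lt⟩
    · rw [if_pos (by simp), if_pos (by simp)]
      rw [show (fun (jc : Int) (ip : Int × Int) => jc + (L - ip.2 - ip.1))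
          = (fun jc ip => jc + ((-1 : Int) * ip.2 + (-1) * ip.1 + L)) from by
            funext jc ip; ring]
      rw [enum_foldl_affine, triB_natCast]
      ring
    · have hl : ¬ (l0 :: lt).length = 0 := by simp
      have hl' : ¬ ((l0 :: lt).length : Int) = 0 := by exact_mod_cast hl
      rw [if_neg hl, if_neg hl']
      have hrlast : (PySem.List.pyGet? (r0 :: rt) (-1)).getD 0 = (r0 :: rt).getLastD 0 := by
        rw [PySem.List.pyGet?_neg_one, List.getLastD_eq_getLast?]
      have hlfirst : (PySem.List.pyGet? (l0 :: lt) 0).getD 0 = (l0 :: lt).headD 0 := by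
        rw [PySem.List.pyGet?_zero_cons]; rfl
      simp only [hrlast, hlfirst]
      rw [show (fun (jc : Int) (ip : Int × Int) =>
            jc + ((r0 :: rt).getLastD 0 - ip.2 - ip.1))
          = (fun jc ip => jc + ((-1 : Int) * ip.2 + (-1) * ip.1 + (r0 :: rt).getLastD 0)) from by
            funext jc ip; ring]
      rw [show (fun (jc : Int) (ip : Int × Int) =>
            jc + (ip.2 - (l0 :: lt).headD 0 - ip.1))
          = (fun jc ip => jc + ((1 : Int) * ip.2 + (-1) * ip.1 + (-(l0 :: lt).headD 0))) from by
            funext jc ip; ring]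
      rw [enum_foldl_affine, enum_foldl_affine, triB_natCast, triB_natCast]
      ring

-- one fold step commutes with the encoding
theorem stepB_encB (L : Int) (st : Int × String × List Int × List Int) (pd : Int × String) :
    stepB L (encB st) pd = encB (stepA L st pd) := by
  obtain ⟨jc, bef, rl, ll⟩ := st
  obtain ⟨p, d⟩ := pd
  simp only [stepA, stepB, encB]
  by_cases hb : bef = "L" ∧ d = "R"
  · simp only [if_pos hb, count_jump_eq_flushB]
    by_cases hd : d = "R" <;> simp [hd]
  · simp only [if_neg hb]
    by_cases hd : d = "R"
    · simp [hd]
    · rcases ll with _ | ⟨l0, lt⟩ <;> simp [hd]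
      exact ⟨by ring, by omega⟩

theorem foldl_encB (L : Int) : ∀ (l : List (Int × String)) (st : Int × String × List Int × List Int),
    l.foldl (stepB L) (encB st) = encB (l.foldl (stepA L) st) := by
  intro l
  induction l with
  | nil => intro st; rfl
  | cons x t ih => intro st; rw [List.foldl_cons, List.foldl_cons, stepB_encB, ih]

-- ===== VERDICT (by name: the statement is the Claim_ definition above) =====
theorem solve_spec : Claim_equal_solve := by
  intro rabbits L _
  unfold Spec_solve solve solve_alt
  have h0 : (0, "R", 0, 0, 0, 0, 0, 0) = encB ((0 : Int), "R", ([] : List Int), ([] : List Int)) := rfl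
  rw [h0, foldl_encB]
  obtain ⟨jc, bef, rl, ll⟩ := rabbits.foldl (stepA L) (0, "R", [], [])
  simp [encB, count_jump_eq_flushB]
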